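-- pv_equiv track=rewrite | github.com/alexandraback/datacollection | solutions_5738606668808192_0/Python/zhuny/skeleton.py | convert_radix
-- ===== SOURCE A (Python) =====
-- def convert_radix(S,r):
--     rp = 1
--     val = 0
--     for s in S[::-1]:
--         if s:
--             val += rp
--         rp *= r
--     return val
-- ===== SOURCE B (Python) =====
-- def convert_radix(S, r):
--     val = 0
--     for s in S:
--         val = val * r + (1 if s else 0)
--     return val
-- ===== Notes on version B (the rewrite author's own statement) =====
-- stated objective: idiomatic
-- what changed: Replaces the reversed iteration with a separate running-power variable by Horner's method: a single forward pass maintaining only one accumulator multiplied by r each step.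
import Mathlib
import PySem

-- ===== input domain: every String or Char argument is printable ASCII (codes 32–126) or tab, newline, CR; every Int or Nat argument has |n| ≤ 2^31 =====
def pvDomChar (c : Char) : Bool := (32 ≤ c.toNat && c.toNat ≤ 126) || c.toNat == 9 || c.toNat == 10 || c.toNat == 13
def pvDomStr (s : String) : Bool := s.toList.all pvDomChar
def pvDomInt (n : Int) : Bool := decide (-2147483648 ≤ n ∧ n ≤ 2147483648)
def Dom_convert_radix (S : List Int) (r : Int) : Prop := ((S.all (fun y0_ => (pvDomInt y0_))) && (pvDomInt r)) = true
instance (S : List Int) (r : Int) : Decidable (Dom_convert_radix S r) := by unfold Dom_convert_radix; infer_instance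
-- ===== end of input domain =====

-- B replaces A's reversed loop with a running power by a forward Horner pass with one accumulator (idiomatic; same cost).

-- ===== PORT A =====
-- state (rp, val); loop over S[::-1]
def convert_radix (S : List Int) (r : Int) : Int :=
  ((((PySem.List.slice? S none none (-1)).getD []).foldl
      (fun (st : Int × Int) s =>
        (st.1 * r, if s ≠ 0 then st.2 + st.1 else st.2))
      (1, 0))).2

-- ===== PORT B =====
def convert_radix_alt (S : List Int) (r : Int) : Int :=
  S.foldl (fun val s => val * r + (if s ≠ 0 then 1 else 0)) 0

-- ===== PRECONDITION & SPEC =====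
def Spec_convert_radix (S : List Int) (r : Int) (out : Int) : Prop := out = convert_radix_alt S r
instance (S : List Int) (r : Int) (out : Int) : Decidable (Spec_convert_radix S r out) := by unfold Spec_convert_radix; infer_instance

-- ===== CLAIM (what is proved, stated in full; the proofs are below) =====
def Claim_equal_convert_radix : Prop := ∀ (S : List Int) (r : Int), Dom_convert_radix S r → Spec_convert_radix S r (convert_radix S r)

-- ===== LEMMAS AND PROOFS =====

-- little-endian value of a bit list
def pvLE (r : Int) : List Int → Int
  | [] => 0
  | s :: t => (if s ≠ 0 then 1 else 0) + r * pvLE r t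

theorem pvA_fold (r : Int) (l : List Int) : ∀ (rp val : Int),
    (l.foldl (fun (st : Int × Int) s =>
        (st.1 * r, if s ≠ 0 then st.2 + st.1 else st.2)) (rp, val)).2
      = val + rp * pvLE r l := by
  induction l with
  | nil => intro rp val; simp [pvLE]
  | cons s t ih =>
    intro rp val
    simp only [List.foldl, pvLE, ih]
    split_ifs <;> ring

theorem pvB_fold (r : Int) (l : List Int) : ∀ (a : Int),
    l.foldl (fun val s => val * r + (if s ≠ 0 then 1 else 0)) a
      = a * r ^ l.length + pvLE r l.reverse := by
  induction l using List.reverseRecOn with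
  | nil => intro a; simp [pvLE]
  | append_singleton t s ih =>
    intro a
    simp only [List.foldl_append, List.foldl, ih, List.reverse_append,
      List.reverse_cons, List.reverse_nil, List.nil_append, List.singleton_append,
      pvLE, List.length_append, List.length_cons, List.length_nil]
    ring

-- ===== VERDICT (by name: the statement is the Claim_ definition above) =====
theorem convert_radix_spec : Claim_equal_convert_radix := by
  intro S r _
  show convert_radix S r = convert_radix_alt S r
  have hs : (PySem.List.slice? S none none (-1)).getD [] = S.reverse := by
    rw [PySem.List.slice?_none_none_neg_one]; rfl
  rw [convert_radix, convert_radix_alt, hs, pvA_fold, pvB_fold]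
  ring
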